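-- pv_equiv track=rewrite | github.com/B4bah/Ege_tasks | Task_27/27_12257.py | max_sum_subsequence_length
-- ===== SOURCE A (Python) =====
-- def max_sum_subsequence_length(arr, K):
--     n = len(arr)
--
--     max_sum = 0
--     current_sum = 0
--     length = 0
--
--     for i in range(n):
--         current_sum += arr[i]
--
--         if current_sum % K == 0:
--             max_sum = current_sum
--             length = i + 1
--
--     return length
-- ===== SOURCE B (Python) =====
-- def max_sum_subsequence_length(arr, K):
--     prefixes = []
--     s = 0
--     for x in arr:
--         s += x
--         prefixes.append(s)
--     for i in range(len(prefixes) - 1, -1, -1):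
--         if prefixes[i] % K == 0:
--             return i + 1
--     return 0
-- ===== Notes on version B (the rewrite author's own statement) =====
-- stated objective: alternative
-- what changed: Replaces A's forward fold that overwrites the last matching index with a precomputed prefix-sum table scanned back-to-front with early exit at the first (i.e. longest) divisible prefix.
import Mathlib
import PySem

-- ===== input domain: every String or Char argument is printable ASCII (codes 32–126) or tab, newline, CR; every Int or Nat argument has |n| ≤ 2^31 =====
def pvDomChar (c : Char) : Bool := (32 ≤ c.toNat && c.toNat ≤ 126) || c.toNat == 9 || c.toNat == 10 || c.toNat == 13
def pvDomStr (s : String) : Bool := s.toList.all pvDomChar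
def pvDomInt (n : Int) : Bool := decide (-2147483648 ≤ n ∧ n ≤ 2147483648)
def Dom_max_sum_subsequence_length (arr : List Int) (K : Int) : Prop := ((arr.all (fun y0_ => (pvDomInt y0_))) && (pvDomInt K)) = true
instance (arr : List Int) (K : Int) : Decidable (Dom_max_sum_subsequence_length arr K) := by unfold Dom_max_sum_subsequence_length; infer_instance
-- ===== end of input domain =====

-- B replaces A's forward fold (which overwrites the last divisible-prefix index) with a
-- precomputed prefix-sum table scanned back-to-front with early exit; same cost, alternative structure.


-- ===== PORT A =====
-- A: one forward pass, remembering the last index i+1 whose running sum is divisible by K.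
def pvGoA (K : Int) : List Int → Int → Int → Int → Int → Int
  | [], _, _, len, _ => len
  | x :: xs, cs, ms, len, i =>
      let c := cs + x
      if PySem.Int.mod c K = 0 then pvGoA K xs c c (i + 1) (i + 1)
      else pvGoA K xs c ms len (i + 1)

def max_sum_subsequence_length (arr : List Int) (K : Int) : Int :=
  pvGoA K arr 0 0 0 0

-- ===== PORT B =====
-- B: build the prefix-sum table, then scan it back-to-front, returning i+1 at the
-- first divisible prefix; 0 if none.
def pvPrefixes : List Int → Int → List Int
  | [], _ => []
  | x :: xs, s => (s + x) :: pvPrefixes xs (s + x)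

def pvBack (K : Int) : List Int → Int → Int
  | [], _ => 0
  | p :: rest, n => if PySem.Int.mod p K = 0 then n else pvBack K rest (n - 1)

def max_sum_subsequence_length_alt (arr : List Int) (K : Int) : Int :=
  let ps := pvPrefixes arr 0
  pvBack K ps.reverse (ps.length : Int)

-- ===== PRECONDITION & SPEC =====
-- Pre_ excludes K = 0 with a nonempty arr, where Python A (and B) raise ZeroDivisionError.
def Pre_max_sum_subsequence_length (arr : List Int) (K : Int) : Prop := arr = [] ∨ K ≠ 0
instance (arr : List Int) (K : Int) : Decidable (Pre_max_sum_subsequence_length arr K) := by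
  unfold Pre_max_sum_subsequence_length; infer_instance
def pvWitness_max_sum_subsequence_length : List Int × Int := ([1, 2, 4], 3)

def Spec_max_sum_subsequence_length (arr : List Int) (K : Int) (out : Int) : Prop := out = max_sum_subsequence_length_alt arr K
instance (arr : List Int) (K : Int) (out : Int) : Decidable (Spec_max_sum_subsequence_length arr K out) := by unfold Spec_max_sum_subsequence_length; infer_instance

-- ===== CLAIM (what is proved, stated in full; the proofs are below) =====
def Claim_equal_max_sum_subsequence_length : Prop := ∀ (arr : List Int) (K : Int), Dom_max_sum_subsequence_length arr K → Pre_max_sum_subsequence_length arr K → Spec_max_sum_subsequence_length arr K (max_sum_subsequence_length arr K)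

-- ===== LEMMAS AND PROOFS =====

theorem pvPrefixes_length (xs : List Int) : ∀ s, (pvPrefixes xs s).length = xs.length := by
  induction xs with
  | nil => intro s; rfl
  | cons x xs ih => intro s; simp [pvPrefixes, ih]

-- every non-zero result of pvBack lies in (n - l.length, n]
theorem pvBack_pos (K : Int) (l : List Int) : ∀ n : Int,
    pvBack K l n = 0 ∨ ((n - l.length) < pvBack K l n ∧ pvBack K l n ≤ n) := by
  induction l with
  | nil => intro n; left; rfl
  | cons p l ih =>
    intro n
    by_cases h : PySem.Int.mod p K = 0
    · right
      simp only [pvBack, if_pos h, List.length_cons]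
      constructor <;> push_cast <;> omega
    · rcases ih (n - 1) with h0 | hb
      · left; simp [pvBack, h, h0]
      · right
        simp only [pvBack, if_neg h, List.length_cons]
        push_cast
        omega

theorem pvBack_snoc (K : Int) (l : List Int) : ∀ (c n : Int), (l.length : Int) < n →
    pvBack K (l ++ [c]) n =
      if pvBack K l n = 0 then (if PySem.Int.mod c K = 0 then n - l.length else 0)
      else pvBack K l n := by
  induction l with
  | nil => intro c n _; simp [pvBack]
  | cons p l ih =>
    intro c n hn
    simp only [List.length_cons] at hn
    by_cases h : PySem.Int.mod p K = 0
    · have hne : pvBack K (p :: l) n ≠ 0 := by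
        simp only [pvBack, if_pos h]; push_cast at hn; omega
      rw [if_neg hne]
      simp only [List.cons_append, pvBack, if_pos h]
    · have hlt : (l.length : Int) < n - 1 := by push_cast at hn ⊢; omega
      simp only [List.cons_append, pvBack, if_neg h, ih c (n - 1) hlt, List.length_cons]
      split_ifs <;> push_cast <;> ring

theorem pvGoA_eq (K : Int) (xs : List Int) : ∀ (cs ms len i : Int), 0 ≤ i →
    pvGoA K xs cs ms len i =
      (if pvBack K (pvPrefixes xs cs).reverse (i + xs.length) = 0 then len
       else pvBack K (pvPrefixes xs cs).reverse (i + xs.length)) := by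
  induction xs with
  | nil => intro cs ms len i _; simp [pvGoA, pvPrefixes, pvBack]
  | cons x xs ih =>
    intro cs ms len i hi
    have hlen : ((pvPrefixes xs (cs + x)).reverse.length : Int) < i + ((x :: xs).length : Int) := by
      simp only [List.length_reverse, pvPrefixes_length, List.length_cons]
      push_cast; omega
    have hsnoc := pvBack_snoc K (pvPrefixes xs (cs + x)).reverse (cs + x)
      (i + ((x :: xs).length : Int)) hlen
    have harg : i + (((x :: xs).length : Nat) : Int) = i + 1 + (xs.length : Int) := by
      simp only [List.length_cons]; push_cast; ring
    have hsub : i + 1 + (xs.length : Int) - ((pvPrefixes xs (cs + x)).reverse.length : Int)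
        = i + 1 := by
      simp only [List.length_reverse, pvPrefixes_length]; ring
    have hrlen : ((pvPrefixes xs (cs + x)).reverse.length : Int) = (xs.length : Int) := by
      simp only [List.length_reverse, pvPrefixes_length]
    have hrbound := pvBack_pos K (pvPrefixes xs (cs + x)).reverse (i + 1 + (xs.length : Int))
    rw [hrlen] at hrbound
    simp only [pvPrefixes, List.reverse_cons]
    rw [hsnoc, harg, hsub]
    by_cases h : PySem.Int.mod (cs + x) K = 0
    · have hstep : pvGoA K (x :: xs) cs ms len i = pvGoA K xs (cs + x) (cs + x) (i + 1) (i + 1) := by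
        simp [pvGoA, h]
      rw [hstep, ih (cs + x) (cs + x) (i + 1) (i + 1) (by omega), if_pos h]
      generalize pvBack K (pvPrefixes xs (cs + x)).reverse (i + 1 + (xs.length : Int)) = r at hrbound ⊢
      by_cases h0 : r = 0
      · simp [h0, show i + 1 ≠ 0 by omega]
      · simp [h0]
    · have hstep : pvGoA K (x :: xs) cs ms len i = pvGoA K xs (cs + x) ms len (i + 1) := by
        simp [pvGoA, h]
      rw [hstep, ih (cs + x) ms len (i + 1) (by omega), if_neg h]
      generalize pvBack K (pvPrefixes xs (cs + x)).reverse (i + 1 + (xs.length : Int)) = r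
      by_cases h0 : r = 0
      · simp [h0]
      · simp [h0]

-- ===== VERDICT (by name: the statement is the Claim_ definition above) =====
theorem max_sum_subsequence_length_spec : Claim_equal_max_sum_subsequence_length := by
  intro arr K _ _
  unfold Spec_max_sum_subsequence_length max_sum_subsequence_length max_sum_subsequence_length_alt
  rw [pvGoA_eq K arr 0 0 0 0 le_rfl]
  simp only [pvPrefixes_length, zero_add]
  split
  · omega
  · rfl
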